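-- pv_equiv track=rewrite | github.com/pokkagrinti/Android-Obfuscator | kontolObfus.py | split_method_by_line
-- ===== SOURCE A (Python) =====
-- def split_method_by_line(method):
--     """
--         Splits the methods at every .line into smaller Smali code chunks
--
--         Params:
--             method(Str): Method to be split
--         Returns:
--             split_method_list(List): List of smaller smali method code chunks
--
--     """
--     temp_method_chunk_builder = ""
--     split_method_list = []
--
--     # Split method into single lines and append them to a string but break when .line is found
--     split_method_lines = method.splitlines()
--     function_declaration = split_method_lines[0]
--     end_method = split_method_lines[-1]
--
--     for line in split_method_lines[1:-1]:
--         if line.startswith('    .line'):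
--             split_method_list.append(temp_method_chunk_builder)
--             temp_method_chunk_builder = ""
--
--         temp_method_chunk_builder += line + "\n"
--     split_method_list.append(temp_method_chunk_builder)
--
--     # Add back method declaration and end method
--     split_method_list.insert(0, function_declaration)
--     split_method_list.append(end_method)
--
--     return split_method_list
-- ===== SOURCE B (Python) =====
-- def split_method_by_line(method):
--     lines = method.splitlines()
--     decl, end = lines[0], lines[-1]
--     inner = lines[1:-1]
--     marks = [i for i, l in enumerate(inner) if l.startswith('    .line')]
--     bounds = [0] + marks + [len(inner)]
--     chunks = ["".join(l + "\n" for l in inner[a:b])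
--               for a, b in zip(bounds, bounds[1:])]
--     return [decl] + chunks + [end]
-- ===== Notes on version B (the rewrite author's own statement) =====
-- stated objective: simpler
-- what changed: Replaces A's stateful chunk-builder loop (string accumulator flushed at each marker line) by computing the marker indices once and slicing the inner lines into consecutive groups between bounds, joining each group.
import Mathlib
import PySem

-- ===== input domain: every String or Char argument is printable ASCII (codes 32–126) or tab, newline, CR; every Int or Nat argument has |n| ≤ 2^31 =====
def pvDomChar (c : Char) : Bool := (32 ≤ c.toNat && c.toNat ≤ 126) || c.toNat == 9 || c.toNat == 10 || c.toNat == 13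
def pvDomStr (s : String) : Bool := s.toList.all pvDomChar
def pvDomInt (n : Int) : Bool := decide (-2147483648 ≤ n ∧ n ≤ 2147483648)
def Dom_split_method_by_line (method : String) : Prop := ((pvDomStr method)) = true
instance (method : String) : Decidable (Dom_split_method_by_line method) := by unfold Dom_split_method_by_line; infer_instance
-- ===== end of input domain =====

-- B replaces A's stateful chunk-builder loop by marker indices + slicing between bounds (objective: simpler).


-- ===== PORT A =====
-- loop body of A's for-loop: flush the builder when the line starts with '    .line', then append line + "\n"
def pvStepA (st : List String × String) (line : String) : List String × String :=
  let st := if PySem.Str.startswith line "    .line" then (st.1 ++ [st.2], "") else st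
  (st.1, st.2 ++ (line ++ "\n"))

def split_method_by_line (method : String) : List String :=
  let split_method_lines := PySem.Str.splitlines method
  match PySem.List.pyGet? split_method_lines 0, PySem.List.pyGet? split_method_lines (-1) with
  | some function_declaration, some end_method =>
      let st := (PySem.List.slice split_method_lines (some 1) (some (-1))).foldl pvStepA ([], "")
      function_declaration :: ((st.1 ++ [st.2]) ++ [end_method])
  | _, _ => []   -- IndexError on an empty line list; excluded by Pre_

-- ===== PORT B =====
def split_method_by_line_alt (method : String) : List String :=
  let lines := PySem.Str.splitlines method
  match PySem.List.pyGet? lines 0 with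
  | none => []   -- IndexError on an empty line list; excluded by Pre_
  | some decl =>
    match PySem.List.pyGet? lines (-1) with
    | none => []   -- IndexError; excluded by Pre_
    | some endm =>
      let inner := PySem.List.slice lines (some 1) (some (-1))
      let marks := ((PySem.List.enumerate inner 0).filter
          (fun p => PySem.Str.startswith p.2 "    .line")).map (·.1)
      let bounds := (0 : Int) :: marks ++ [(inner.length : Int)]
      let chunks := (bounds.zip bounds.tail).map
          (fun p => PySem.Str.join "" ((PySem.List.slice inner (some p.1) (some p.2)).map (· ++ "\n")))
      [decl] ++ chunks ++ [endm]

-- ===== PRECONDITION & SPEC =====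
-- Pre_ excludes only the empty string, on which A raises IndexError (splitlines gives no lines).
def Pre_split_method_by_line (method : String) : Prop := method ≠ ""
instance (method : String) : Decidable (Pre_split_method_by_line method) := by unfold Pre_split_method_by_line; infer_instance

def pvWitness_split_method_by_line : String :=
  ".method a\n    .line 1\n    nop\n.end method"

def Spec_split_method_by_line (method : String) (out : List String) : Prop := out = split_method_by_line_alt method
instance (method : String) (out : List String) : Decidable (Spec_split_method_by_line method out) := by unfold Spec_split_method_by_line; infer_instance

-- ===== CLAIM (what is proved, stated in full; the proofs are below) =====
def Claim_equal_split_method_by_line : Prop := ∀ (method : String), Dom_split_method_by_line method → Pre_split_method_by_line method → Spec_split_method_by_line method (split_method_by_line method)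

-- ===== LEMMAS AND PROOFS =====

-- the marker test both programs use
def pvMarker (l : String) : Bool := PySem.Str.startswith l "    .line"

-- canonical recursive form of the chunk list both programs produce between declaration and end line
def pvF : List String → String → List String
  | [], cur => [cur]
  | l :: ls, cur =>
      if pvMarker l then cur :: pvF ls ("" ++ (l ++ "\n")) else pvF ls (cur ++ (l ++ "\n"))

-- prepend a string onto the first chunk
def pvPre (c : String) : List String → List String
  | [] => []
  | h :: t => (c ++ h) :: t

-- Nat-level mirror of B's marker indices
def pvMarksN : List String → List Nat
  | [] => []
  | l :: ls => (if pvMarker l then [0] else []) ++ (pvMarksN ls).map (· + 1)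

def pvChunkN (xs : List String) (a b : Nat) : String :=
  PySem.Str.join "" (((xs.drop a).take (b - a)).map (· ++ "\n"))

def pvPairsN (xs : List String) (bs : List Nat) : List String :=
  (bs.zip bs.tail).map (fun p => pvChunkN xs p.1 p.2)

theorem pv_join_nil : PySem.Str.join "" ([] : List String) = "" := by
  apply String.toList_inj.mp
  simp [PySem.Str.join, PySem.Chars.join_nil]

theorem pv_join_cons (x : String) (xs : List String) :
    PySem.Str.join "" (x :: xs) = x ++ PySem.Str.join "" xs := by
  apply String.toList_inj.mp
  simp [PySem.Str.join, PySem.Chars.join, List.intercalate]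
  cases xs <;> simp

-- A's fold computes pvF
theorem pvA_fold (ls : List String) (acc : List String) (cur : String) :
    (ls.foldl pvStepA (acc, cur)).1 ++ [(ls.foldl pvStepA (acc, cur)).2] = acc ++ pvF ls cur := by
  induction ls generalizing acc cur with
  | nil => simp [pvF]
  | cons l ls ih =>
    rcases hm : pvMarker l with _ | _ <;>
      simp only [List.foldl_cons, pvStepA, pvF, pvMarker] at hm ⊢ <;>
      simp only [hm] <;> simp <;> rw [ih] <;> try simp

theorem pvPre_pvPre (a b : String) (G : List String) :
    pvPre a (pvPre b G) = pvPre (a ++ b) G := by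
  cases G <;> simp [pvPre, String.append_assoc]

theorem pvF_pre (ls : List String) (c : String) : pvF ls c = pvPre c (pvF ls "") := by
  induction ls generalizing c with
  | nil => simp [pvF, pvPre]
  | cons l ls ih =>
    rcases hm : pvMarker l with _ | _ <;> simp only [pvF, hm] <;> simp
    · rw [ih (c ++ (l ++ "\n")), ih (l ++ "\n"), pvPre_pvPre]
    · simp [pvPre]

-- shifting all bounds by one drops the head line
theorem pvPairsN_shift (l : String) (ls : List String) (bs : List Nat) :
    pvPairsN (l :: ls) (bs.map (· + 1)) = pvPairsN ls bs := by
  unfold pvPairsN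
  rw [← List.map_tail, List.zip_map, List.map_map]
  apply List.map_congr_left
  intro p _
  simp [pvChunkN]

theorem pvPairsN_head (l : String) (ls : List String) (bs : List Nat) :
    pvPairsN (l :: ls) (0 :: bs.map (· + 1)) = pvPre (l ++ "\n") (pvPairsN ls (0 :: bs)) := by
  cases bs with
  | nil => simp [pvPairsN, pvPre]
  | cons b bs =>
    have h1 : pvPairsN (l :: ls) (0 :: (b :: bs).map (· + 1))
        = pvChunkN (l :: ls) 0 (b + 1) :: pvPairsN (l :: ls) ((b :: bs).map (· + 1)) := by
      simp [pvPairsN]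
    rw [h1, pvPairsN_shift]
    have h2 : pvChunkN (l :: ls) 0 (b + 1) = (l ++ "\n") ++ pvChunkN ls 0 b := by
      simp [pvChunkN, pv_join_cons]
    have h3 : pvPairsN ls (0 :: b :: bs) = pvChunkN ls 0 b :: pvPairsN ls (b :: bs) := by
      simp [pvPairsN]
    rw [h2, h3]
    simp [pvPre]

-- B's bounds-and-slices chunks are pvF
theorem pvPairsN_spec (ls : List String) :
    pvPairsN ls (0 :: pvMarksN ls ++ [ls.length]) = pvF ls "" := by
  induction ls with
  | nil => simp [pvPairsN, pvMarksN, pvF, pvChunkN, pv_join_nil]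
  | cons l ls ih =>
    have hb : pvMarksN (l :: ls) ++ [(l :: ls).length]
        = (if pvMarker l then [0] else []) ++ (pvMarksN ls ++ [ls.length]).map (· + 1) := by
      simp [pvMarksN]
    rcases hm : pvMarker l with _ | _
    · rw [show (0 : Nat) :: pvMarksN (l :: ls) ++ [(l :: ls).length]
          = 0 :: (pvMarksN (l :: ls) ++ [(l :: ls).length]) by simp, hb, hm]
      simp only [Bool.false_eq_true, if_false, List.nil_append]
      rw [pvPairsN_head]
      have ih' : pvPairsN ls (0 :: (pvMarksN ls ++ [ls.length])) = pvF ls "" := ih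
      rw [ih', ← pvF_pre]
      simp [pvF, hm]
    · rw [show (0 : Nat) :: pvMarksN (l :: ls) ++ [(l :: ls).length]
          = 0 :: (pvMarksN (l :: ls) ++ [(l :: ls).length]) by simp, hb, hm]
      simp only [if_true, List.singleton_append]
      have h0 : pvPairsN (l :: ls) (0 :: 0 :: (pvMarksN ls ++ [ls.length]).map (· + 1))
          = pvChunkN (l :: ls) 0 0 :: pvPairsN (l :: ls) (0 :: (pvMarksN ls ++ [ls.length]).map (· + 1)) := by
        simp [pvPairsN]
      rw [h0, pvPairsN_head]
      have ih' : pvPairsN ls (0 :: (pvMarksN ls ++ [ls.length])) = pvF ls "" := ih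
      rw [ih', ← pvF_pre]
      have : pvChunkN (l :: ls) 0 0 = "" := by simp [pvChunkN, pv_join_nil]
      rw [this]
      simp [pvF, hm]

-- B's enumerate/filter marks are the Nat marks, cast and shifted by the start
theorem pvMarks_cast (ls : List String) (s : Int) :
    ((PySem.List.enumerate ls s).filter (fun p => pvMarker p.2)).map (·.1)
      = (pvMarksN ls).map (fun n : Nat => s + (n : Int)) := by
  induction ls generalizing s with
  | nil => simp [pvMarksN, PySem.List.enumerate_nil]
  | cons l ls ih =>
    rw [PySem.List.enumerate_cons]
    rcases hm : pvMarker l with _ | _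
    · rw [List.filter_cons_of_neg (by simp [hm]), ih (s+1)]
      simp only [pvMarksN, hm, Bool.false_eq_true, if_false, List.nil_append, List.map_map]
      apply List.map_congr_left
      intro n _
      simp only [Function.comp]
      push_cast
      ring
    · rw [List.filter_cons_of_pos (by simp [hm]), List.map_cons, ih (s+1)]
      simp only [pvMarksN, hm, if_true, List.singleton_append, List.map_cons, List.map_map]
      refine congrArg₂ _ (by push_cast; ring) ?_
      apply List.map_congr_left
      intro n _
      simp only [Function.comp]
      push_cast
      ring

-- B's Int-bound chunk list equals the Nat-level one
theorem pvPairs_cast (xs : List String) (bs : List Nat) :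
    ((bs.map (fun n : Nat => (n : Int))).zip (bs.map (fun n : Nat => (n : Int))).tail).map
        (fun p => PySem.Str.join "" ((PySem.List.slice xs (some p.1) (some p.2)).map (· ++ "\n")))
      = pvPairsN xs bs := by
  unfold pvPairsN
  rw [← List.map_tail, List.zip_map, List.map_map]
  apply List.map_congr_left
  intro p _
  simp [pvChunkN, PySem.List.slice_natCast]

-- ===== VERDICT (by name: the statement is the Claim_ definition above) =====
theorem split_method_by_line_spec : Claim_equal_split_method_by_line := by
  intro method _ _
  unfold Spec_split_method_by_line split_method_by_line split_method_by_line_alt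
  cases h0 : PySem.List.pyGet? (PySem.Str.splitlines method) 0 with
  | none => simp [h0]
  | some decl =>
    cases h1 : PySem.List.pyGet? (PySem.Str.splitlines method) (-1) with
    | none => simp [h0, h1]
    | some endm =>
      simp only [h0, h1]
      set inner := PySem.List.slice (PySem.Str.splitlines method) (some 1) (some (-1)) with hin
      have hA := pvA_fold inner [] ""
      rw [List.nil_append] at hA
      rw [hA]
      have hmk : ((PySem.List.enumerate inner 0).filter
            (fun p => PySem.Str.startswith p.2 "    .line")).map (·.1)
          = (pvMarksN inner).map (fun n : Nat => (n : Int)) := by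
        rw [show (fun p : Int × String => PySem.Str.startswith p.2 "    .line")
            = (fun p : Int × String => pvMarker p.2) from rfl, pvMarks_cast]
        apply List.map_congr_left
        intro n _
        ring
      rw [hmk]
      have hbounds : (0 : Int) :: (pvMarksN inner).map (fun n : Nat => (n : Int)) ++ [(inner.length : Int)]
          = (0 :: (pvMarksN inner ++ [inner.length])).map (fun n : Nat => (n : Int)) := by
        simp
      rw [hbounds, pvPairs_cast]
      have hfin : pvPairsN inner (0 :: (pvMarksN inner ++ [inner.length])) = pvF inner "" :=
        pvPairsN_spec inner
      rw [hfin]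
      simp
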